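-- pv_equiv track=rewrite | github.com/nykodetherapeutics/nydok | nydok/report.py | _render_md_table
-- ===== SOURCE A (Python) =====
-- from typing import Dict, List, Optional, Set, Tuple
--
-- def _render_md_table(header, rows, max_col_width=100):
--     def _md_table_row(cols: List[str], col_widths: List[int]):
--
--         return " | ".join(
--             # Pad each entry with col_widths
--             [
--                 "{h:<{w}}".format(
--                     h=cols[i],
--                     w=col_widths[i],
--                 )
--                 for i in range(0, len(cols))
--             ]
--         )
--
--     # Find max col size per column
--     max_col_size: List[int] = []
--     for idx in range(0, len(header)):
--         max_col_size.append(min(max([len(r[idx]) for r in [header] + rows]), max_col_width))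
--
--     result = ""
--     result += _md_table_row(header, max_col_size) + "\n"
--     result += (
--         _md_table_row(["-" * max_col_size[i] for i in range(0, len(header))], max_col_size) + "\n"
--     )
--     for row in rows:
--         result += _md_table_row(row, max_col_size) + "\n"
--
--     return result
-- ===== SOURCE B (Python) =====
-- def _render_md_table(header, rows, max_col_width=100):
--     # Column-major construction: build each padded column (header cell, dash
--     # separator, row cells) first, then assemble lines by indexing across columns.
--     columns = []
--     for j in range(len(header)):
--         cells = [header[j]] + [r[j] for r in rows]
--         w = min(max(len(c) for c in cells), max_col_width)
--         columns.append([cells[0].ljust(w), "-" * w] + [c.ljust(w) for c in cells[1:]])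
--     return "".join(
--         " | ".join(col[i] for col in columns) + "\n"
--         for i in range(len(rows) + 2)
--     )
-- ===== Notes on version B (the rewrite author's own statement) =====
-- stated objective: alternative
-- what changed: B builds the table column-major: for each column it gathers the column's cells, clamps the width, pads the whole column (inserting the dash separator cell) and then assembles each output line by indexing across the padded columns, instead of A's row-major rendering with a per-column width pre-pass and repeated string concatenation.
import Mathlib
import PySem

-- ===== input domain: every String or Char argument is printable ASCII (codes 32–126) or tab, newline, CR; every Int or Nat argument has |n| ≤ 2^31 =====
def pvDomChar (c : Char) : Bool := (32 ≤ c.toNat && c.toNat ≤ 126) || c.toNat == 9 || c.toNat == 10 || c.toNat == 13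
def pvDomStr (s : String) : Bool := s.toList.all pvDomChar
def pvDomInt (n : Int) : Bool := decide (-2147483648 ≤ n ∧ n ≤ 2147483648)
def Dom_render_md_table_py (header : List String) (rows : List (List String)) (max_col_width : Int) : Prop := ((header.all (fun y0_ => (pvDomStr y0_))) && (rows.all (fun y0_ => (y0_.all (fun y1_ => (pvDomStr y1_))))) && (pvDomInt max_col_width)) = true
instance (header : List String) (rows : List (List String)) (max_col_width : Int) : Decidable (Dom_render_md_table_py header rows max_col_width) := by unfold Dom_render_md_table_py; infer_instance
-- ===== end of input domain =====

-- B renders the same markdown table column-major: it pads each whole column (header cell,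
-- dash separator, row cells) first and then assembles lines by indexing across the columns.


-- ===== PORT A =====
-- "{h:<{w}}" left-justification, hand-ported (no PySem primitive): exact for w ≥ 0
-- (Python raises ValueError for negative w; Pre_ excludes those inputs).
def pvPad (s : String) (w : Int) : String :=
  s ++ String.ofList (List.replicate (w - PySem.Str.len s).toNat ' ')

-- A's inner helper _md_table_row: cols[i] is in range (i < len cols); col_widths[i]
-- raises IndexError when len col_widths < len cols — outside Pre_, getD 0 stands in.
def pvMdTableRow (cols : List String) (colWidths : List Int) : String :=
  PySem.Str.join " | "
    ((List.range cols.length).map (fun i => pvPad (cols.getD i "") (colWidths.getD i 0)))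

-- A's max_col_size loop (r[idx] raises on short rows — outside Pre_, getD "" stands in)
def pvMaxColSize (header : List String) (rows : List (List String)) (max_col_width : Int) : List Int :=
  (List.range header.length).foldl
    (fun acc idx =>
      acc ++ [min (PySem.List.maxD ((header :: rows).map (fun r => PySem.Str.len (r.getD idx ""))) (fun x => x) 0) max_col_width])
    []

def render_md_table_py (header : List String) (rows : List (List String)) (max_col_width : Int) : String :=
  let maxColSize := pvMaxColSize header rows max_col_width
  rows.foldl (fun acc row => acc ++ (pvMdTableRow row maxColSize ++ "\n"))
    ("" ++ (pvMdTableRow header maxColSize ++ "\n")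
        ++ (pvMdTableRow ((List.range header.length).map (fun i => String.ofList (List.replicate (maxColSize.getD i 0).toNat '-'))) maxColSize ++ "\n"))

-- ===== PORT B =====
-- str.ljust(w) is exactly the same padding as "{:<{w}}" for w ≥ 0, so B's port reuses pvPad.
-- one padded column: [header[j].ljust(w), "-"*w] + [r[j].ljust(w) for r in rows]
-- (header[j] is in range for j < len header; r[j] raises on short rows — outside Pre_,
-- getD "" stands in)
def pvColumnB (header : List String) (rows : List (List String)) (max_col_width : Int) (j : Nat) : List String :=
  let cells := header.getD j "" :: rows.map (fun r => r.getD j "")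
  let w := min (PySem.List.maxD (cells.map (fun c => PySem.Str.len c)) (fun x => x) 0) max_col_width
  pvPad (cells.headD "") w :: String.ofList (List.replicate w.toNat '-')
    :: cells.tail.map (fun c => pvPad c w)

def render_md_table_py_alt (header : List String) (rows : List (List String)) (max_col_width : Int) : String :=
  let columns := (List.range header.length).map (pvColumnB header rows max_col_width)
  PySem.Str.join ""
    ((List.range (rows.length + 2)).map (fun i =>
      PySem.Str.join " | " (columns.map (fun col => col.getD i "")) ++ "\n"))

-- ===== PRECONDITION & SPEC =====
-- Exactly A's return domain: a row shorter or longer than the header raises IndexError,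
-- and a negative max_col_width with a nonempty header raises ValueError in str.format.
def Pre_render_md_table_py (header : List String) (rows : List (List String)) (max_col_width : Int) : Prop :=
  (∀ r ∈ rows, r.length = header.length) ∧ (header = [] ∨ 0 ≤ max_col_width)
instance (header : List String) (rows : List (List String)) (max_col_width : Int) : Decidable (Pre_render_md_table_py header rows max_col_width) := by unfold Pre_render_md_table_py; infer_instance

def pvWitness_render_md_table_py : List String × List (List String) × Int :=
  (["a", "bb"], [["ccc", "d"]], 100)

def Spec_render_md_table_py (header : List String) (rows : List (List String)) (max_col_width : Int) (out : String) : Prop := out = render_md_table_py_alt header rows max_col_width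
instance (header : List String) (rows : List (List String)) (max_col_width : Int) (out : String) : Decidable (Spec_render_md_table_py header rows max_col_width out) := by unfold Spec_render_md_table_py; infer_instance

-- ===== CLAIM (what is proved, stated in full; the proofs are below) =====
def Claim_equal_render_md_table_py : Prop := ∀ (header : List String) (rows : List (List String)) (max_col_width : Int), Dom_render_md_table_py header rows max_col_width → Pre_render_md_table_py header rows max_col_width → Spec_render_md_table_py header rows max_col_width (render_md_table_py header rows max_col_width)

-- ===== LEMMAS AND PROOFS =====

theorem str_join_empty_cons (x : String) (xs : List String) :
    PySem.Str.join "" (x :: xs) = x ++ PySem.Str.join "" xs := by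
  apply String.ext
  cases xs with
  | nil => simp [PySem.Str.toList_join, PySem.Chars.join, List.intercalate]
  | cons y t => simp [PySem.Str.toList_join, PySem.Chars.join, List.intercalate]

theorem foldl_append_eq_join (g : List String → String) :
    ∀ (rows : List (List String)) (init : String),
    rows.foldl (fun acc row => acc ++ (g row ++ "\n")) init
      = init ++ PySem.Str.join "" (rows.map (fun row => g row ++ "\n")) := by
  intro rows
  induction rows with
  | nil =>
    intro init
    apply String.ext
    simp [PySem.Str.toList_join, PySem.Chars.join, List.intercalate]
  | cons r rt ih =>
    intro init
    simp only [List.foldl_cons, List.map_cons, str_join_empty_cons]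
    rw [ih, String.append_assoc]

-- getD through a map, for an in-range index
theorem getD_map_lt {α β : Type} (f : α → β) (l : List α) (k : Nat) (h : k < l.length)
    (d : α) (d' : β) : (l.map f).getD k d' = f (l.getD k d) := by
  simp [List.getD, h]

-- getD of a range-map, in range
theorem getD_range_map {β : Type} (g : Nat → β) (n j : Nat) (h : j < n) (d : β) :
    ((List.range n).map g).getD j d = g j := by
  simp [List.getD, h]

-- padding a full-width dash string is a no-op
theorem pvPad_dashes (w : Int) :
    pvPad (String.ofList (List.replicate w.toNat '-')) w
      = String.ofList (List.replicate w.toNat '-') := by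
  apply String.ext
  simp [pvPad, PySem.Str.len_eq]

-- A's width list is the range-map form
theorem pvMaxColSize_eq_map (header : List String) (rows : List (List String)) (mcw : Int) :
    pvMaxColSize header rows mcw
      = (List.range header.length).map
          (fun idx => min (PySem.List.maxD ((header :: rows).map (fun r => PySem.Str.len (r.getD idx ""))) (fun x => x) 0) mcw) := by
  unfold pvMaxColSize
  rw [PySem.List.foldl_append_singleton_eq_map]
  simp

-- B's clamped column width equals A's, for j < len header
theorem colB_width_eq (header : List String) (rows : List (List String)) (mcw : Int)
    (j : Nat) (hj : j < header.length) :
    min (PySem.List.maxD ((header.getD j "" :: rows.map (fun r => r.getD j "")).map (fun c => PySem.Str.len c)) (fun x => x) 0) mcw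
      = (pvMaxColSize header rows mcw).getD j 0 := by
  rw [pvMaxColSize_eq_map, getD_range_map _ _ _ hj]
  simp [Function.comp_def]

-- range-indexing one list with a default equals mapping over it
theorem range_getD_eq_map {α γ : Type} (g : α → γ) (da : α) :
    ∀ (as_ : List α),
    (List.range as_.length).map (fun i => g (as_.getD i da)) = as_.map g := by
  intro as_
  induction as_ with
  | nil => simp
  | cons a at_ ih =>
    simp only [List.length_cons, List.range_succ_eq_map, List.map_cons, List.map_map]
    congr 1

-- map f over range (n+2), peeled
theorem range_add_two_map {β : Type} (f : Nat → β) (n : Nat) :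
    (List.range (n+2)).map f = f 0 :: f 1 :: (List.range n).map (fun k => f (k+2)) := by
  simp [List.range_succ_eq_map, List.map_map, Function.comp_def]

-- ===== VERDICT (by name: the statement is the Claim_ definition above) =====
theorem render_md_table_py_spec : Claim_equal_render_md_table_py := by
  intro header rows mcw _ hpre
  obtain ⟨hlen, _⟩ := hpre
  show render_md_table_py header rows mcw = render_md_table_py_alt header rows mcw
  unfold render_md_table_py render_md_table_py_alt
  set ws := pvMaxColSize header rows mcw with hws
  set H := header.length with hH
  rw [foldl_append_eq_join]
  simp only [List.map_map, Function.comp_def]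
  rw [range_add_two_map
      (fun i => PySem.Str.join " | "
        ((List.range H).map (fun j => (pvColumnB header rows mcw j).getD i "" )) ++ "\n")
      rows.length]
  rw [str_join_empty_cons, str_join_empty_cons]
  -- the header line
  have e0 : PySem.Str.join " | "
      ((List.range H).map (fun j => (pvColumnB header rows mcw j).getD 0 ""))
      = pvMdTableRow header ws := by
    unfold pvMdTableRow
    congr 1
    apply List.map_congr_left
    intro j hj
    have hj' : j < H := by simpa using hj
    simp only [pvColumnB, List.getD_cons_zero, List.headD_cons]
    rw [colB_width_eq header rows mcw j hj']
  -- the dash line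
  have e1 : PySem.Str.join " | "
      ((List.range H).map (fun j => (pvColumnB header rows mcw j).getD 1 ""))
      = pvMdTableRow ((List.range H).map (fun i => String.ofList (List.replicate (ws.getD i 0).toNat '-'))) ws := by
    unfold pvMdTableRow
    simp only [List.length_map, List.length_range]
    congr 1
    apply List.map_congr_left
    intro j hj
    have hj' : j < H := by simpa using hj
    rw [getD_range_map _ _ _ hj', pvPad_dashes]
    simp only [pvColumnB]
    rw [colB_width_eq header rows mcw j hj']
    rfl
  -- the body lines
  have e2 : (List.range rows.length).map (fun k => PySem.Str.join " | "
        ((List.range H).map (fun j => (pvColumnB header rows mcw j).getD (k+2) "")) ++ "\n")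
      = rows.map (fun row => pvMdTableRow row ws ++ "\n") := by
    have step : ∀ k < rows.length,
        (List.range H).map (fun j => (pvColumnB header rows mcw j).getD (k+2) "")
          = (List.range H).map (fun j => pvPad ((rows.getD k []).getD j "") (ws.getD j 0)) := by
      intro k hk
      apply List.map_congr_left
      intro j hj
      have hj' : j < H := by simpa using hj
      simp only [pvColumnB, List.getD_cons_succ, List.tail_cons, List.map_map]
      rw [getD_map_lt _ rows k hk []]
      rw [colB_width_eq header rows mcw j hj']
      simp [← hws]
    have hmid : (List.range rows.length).map (fun k => PySem.Str.join " | "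
          ((List.range H).map (fun j => (pvColumnB header rows mcw j).getD (k+2) "")) ++ "\n")
        = (List.range rows.length).map (fun k => PySem.Str.join " | "
          ((List.range H).map (fun j => pvPad ((rows.getD k []).getD j "") (ws.getD j 0))) ++ "\n") := by
      apply List.map_congr_left
      intro k hk
      rw [step k (by simpa using hk)]
    rw [hmid]
    rw [range_getD_eq_map (fun row => PySem.Str.join " | "
          ((List.range H).map (fun j => pvPad (row.getD j "") (ws.getD j 0))) ++ "\n") [] rows]
    apply List.map_congr_left
    intro row hrow
    unfold pvMdTableRow
    rw [hlen row hrow]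
  rw [e0, e1, e2]
  apply String.ext
  simp [String.append_assoc]
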